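-- pv_equiv track=rewrite | github.com/AuNooAI/AunooAI | app/services/tool_plugin_base.py | _format_articles_for_prompt
-- ===== SOURCE A (Python) =====
-- from typing import Any, Dict, List, Optional, Type, Callable, Union
--
-- def _format_articles_for_prompt(articles: List[Dict], max_chars: int = 8000) -> str:
--     """Format articles for LLM context."""
--     lines = []
--     char_count = 0
--
--     for i, article in enumerate(articles, 1):
--         title = article.get('title', 'Untitled')
--         summary = article.get('summary', '')[:200]
--         source = article.get('news_source', 'Unknown')
--         sentiment = article.get('sentiment', '')
--         bias = article.get('political_bias') or article.get('media_bias', '')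
--
--         line = f"{i}. [{source}] {title}"
--         if sentiment:
--             line += f" (Sentiment: {sentiment})"
--         if bias:
--             line += f" (Bias: {bias})"
--         if summary:
--             line += f"\n   {summary}"
--
--         if char_count + len(line) > max_chars:
--             lines.append(f"... and {len(articles) - i + 1} more articles")
--             break
--
--         lines.append(line)
--         char_count += len(line)
--
--     return "\n".join(lines)
-- ===== SOURCE B (Python) =====
-- def _format_line(i, article):
--     title = article.get('title', 'Untitled')
--     summary = article.get('summary', '')[:200]
--     source = article.get('news_source', 'Unknown')
--     sentiment = article.get('sentiment', '')
--     bias = article.get('political_bias') or article.get('media_bias', '')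
--     line = f"{i}. [{source}] {title}"
--     if sentiment:
--         line += f" (Sentiment: {sentiment})"
--     if bias:
--         line += f" (Bias: {bias})"
--     if summary:
--         line += f"\n   {summary}"
--     return line
--
-- def _format_articles_for_prompt(articles, max_chars=8000):
--     """Format articles for LLM context (build all lines, then scan for the cutoff)."""
--     line_strs = [_format_line(i, a) for i, a in enumerate(articles, 1)]
--     cut = None
--     total = 0
--     for idx, line in enumerate(line_strs):
--         if total + len(line) > max_chars:
--             cut = idx
--             break
--         total += len(line)
--     if cut is None:
--         return "\n".join(line_strs)
--     return "\n".join(line_strs[:cut] + [f"... and {len(articles) - cut} more articles"])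
-- ===== Notes on version B (the rewrite author's own statement) =====
-- stated objective: alternative
-- what changed: Replaced A's single interleaved format-check-accumulate-break loop by a two-pass build-then-scan decomposition: first format every article into its full line, then scan the line list with a running total to find the cutoff index and assemble the output (all lines, or the prefix plus the '... and N more articles' line).
import Mathlib
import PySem

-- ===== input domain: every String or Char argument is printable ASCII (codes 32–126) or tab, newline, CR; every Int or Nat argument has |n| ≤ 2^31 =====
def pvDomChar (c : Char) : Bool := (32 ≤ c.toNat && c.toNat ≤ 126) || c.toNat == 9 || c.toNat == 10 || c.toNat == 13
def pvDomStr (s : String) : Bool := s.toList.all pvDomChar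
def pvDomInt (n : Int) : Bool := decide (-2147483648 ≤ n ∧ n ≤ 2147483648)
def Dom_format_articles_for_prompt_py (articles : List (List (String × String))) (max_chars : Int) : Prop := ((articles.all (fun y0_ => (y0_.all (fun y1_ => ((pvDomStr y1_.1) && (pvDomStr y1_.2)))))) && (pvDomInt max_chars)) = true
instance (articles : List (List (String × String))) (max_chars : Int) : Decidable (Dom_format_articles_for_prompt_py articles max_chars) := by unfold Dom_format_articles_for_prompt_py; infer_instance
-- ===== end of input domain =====

-- B rebuilds A's interleaved accumulate-and-break loop as a build-then-scan decomposition (format all lines, then find the cutoff); objective: alternative, same cost.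

-- ===== PORT A =====
-- the formatting of one article's line (the body of A's loop before the budget check)
def pvLineA (i : Int) (article : List (String × String)) : List Char :=
  let d := PySem.Dict.ofList article
  let title := PySem.Dict.getD d "title" "Untitled"
  let summary := PySem.List.slice (PySem.Dict.getD d "summary" "").toList none (some 200)
  let source := PySem.Dict.getD d "news_source" "Unknown"
  let sentiment := PySem.Dict.getD d "sentiment" ""
  let bias := match PySem.Dict.get? d "political_bias" with
    | some v => if v = "" then PySem.Dict.getD d "media_bias" "" else v
    | none => PySem.Dict.getD d "media_bias" ""
  let line := (PySem.Int.toStr i).toList ++ ". [".toList ++ source.toList ++ "] ".toList ++ title.toList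
  let line := if sentiment = "" then line else line ++ " (Sentiment: ".toList ++ sentiment.toList ++ ")".toList
  let line := if bias = "" then line else line ++ " (Bias: ".toList ++ bias.toList ++ ")".toList
  let line := if summary = [] then line else line ++ "\n   ".toList ++ summary
  line

def pvMoreA (k : Int) : List Char := "... and ".toList ++ (PySem.Int.toStr k).toList ++ " more articles".toList

-- A's loop: state (1-based index i, char_count, accumulated lines); break appends the "... and N more" line
def pvLoopA (n : Int) (max_chars : Int) : List (List (String × String)) → Int → Int → List (List Char) → List (List Char)
  | [], _, _, lines => lines
  | a :: rest, i, char_count, lines =>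
    let line := pvLineA i a
    if char_count + (line.length : Int) > max_chars then
      lines ++ [pvMoreA (n - i + 1)]
    else
      pvLoopA n max_chars rest (i + 1) (char_count + (line.length : Int)) (lines ++ [line])

def format_articles_for_prompt_py (articles : List (List (String × String))) (max_chars : Int) : String :=
  String.ofList (PySem.Chars.join "\n".toList (pvLoopA (articles.length : Int) max_chars articles 1 0 []))

-- ===== PORT B =====
def pvLineB (i : Int) (article : List (String × String)) : List Char :=
  let d := PySem.Dict.ofList article
  let title := PySem.Dict.getD d "title" "Untitled"
  let summary := PySem.List.slice (PySem.Dict.getD d "summary" "").toList none (some 200)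
  let source := PySem.Dict.getD d "news_source" "Unknown"
  let sentiment := PySem.Dict.getD d "sentiment" ""
  let bias := match PySem.Dict.get? d "political_bias" with
    | some v => if v = "" then PySem.Dict.getD d "media_bias" "" else v
    | none => PySem.Dict.getD d "media_bias" ""
  let line := (PySem.Int.toStr i).toList ++ ". [".toList ++ source.toList ++ "] ".toList ++ title.toList
  let line := if sentiment = "" then line else line ++ " (Sentiment: ".toList ++ sentiment.toList ++ ")".toList
  let line := if bias = "" then line else line ++ " (Bias: ".toList ++ bias.toList ++ ")".toList
  let line := if summary = [] then line else line ++ "\n   ".toList ++ summary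
  line

-- pass 1: [_format_line(i, a) for i, a in enumerate(articles, 1)]
def pvAllLines : List (List (String × String)) → Int → List (List Char)
  | [], _ => []
  | a :: rest, i => pvLineB i a :: pvAllLines rest (i + 1)

-- pass 2: first index whose line would overflow the running total (None if no overflow)
def pvFindCut (max_chars : Int) : List (List Char) → Int → Option Nat
  | [], _ => none
  | l :: rest, total =>
    if total + (l.length : Int) > max_chars then some 0
    else (pvFindCut max_chars rest (total + (l.length : Int))).map (· + 1)

def pvMoreB (k : Int) : List Char := "... and ".toList ++ (PySem.Int.toStr k).toList ++ " more articles".toList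

def format_articles_for_prompt_py_alt (articles : List (List (String × String))) (max_chars : Int) : String :=
  let ls := pvAllLines articles 1
  match pvFindCut max_chars ls 0 with
  | none => String.ofList (PySem.Chars.join "\n".toList ls)
  | some c => String.ofList (PySem.Chars.join "\n".toList (ls.take c ++ [pvMoreB ((articles.length : Int) - (c : Int))]))

-- ===== PRECONDITION & SPEC =====
def Spec_format_articles_for_prompt_py (articles : List (List (String × String))) (max_chars : Int) (out : String) : Prop := out = format_articles_for_prompt_py_alt articles max_chars
instance (articles : List (List (String × String))) (max_chars : Int) (out : String) : Decidable (Spec_format_articles_for_prompt_py articles max_chars out) := by unfold Spec_format_articles_for_prompt_py; infer_instance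

-- ===== CLAIM (what is proved, stated in full; the proofs are below) =====
def Claim_equal_format_articles_for_prompt_py : Prop := ∀ (articles : List (List (String × String))) (max_chars : Int), Dom_format_articles_for_prompt_py articles max_chars → Spec_format_articles_for_prompt_py articles max_chars (format_articles_for_prompt_py articles max_chars)

-- ===== LEMMAS AND PROOFS =====
theorem pvLine_eq : pvLineA = pvLineB := rfl

theorem pvMore_eq : pvMoreA = pvMoreB := rfl

theorem pvLoopA_eq_scan (n max_chars : Int) :
    ∀ (rest : List (List (String × String))) (i char_count : Int) (acc : List (List Char)),
      pvLoopA n max_chars rest i char_count acc =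
        acc ++ (match pvFindCut max_chars (pvAllLines rest i) char_count with
          | none => pvAllLines rest i
          | some c => (pvAllLines rest i).take c ++ [pvMoreB (n - i - (c : Int) + 1)]) := by
  intro rest
  induction rest with
  | nil => intro i cc acc; simp [pvLoopA, pvAllLines, pvFindCut]
  | cons a rest ih =>
    intro i cc acc
    simp only [pvLoopA, pvAllLines, pvFindCut, pvLine_eq]
    by_cases h : cc + ((pvLineB i a).length : Int) > max_chars
    · simp [h, pvMore_eq]
    · simp only [if_neg h, ih (i + 1) (cc + ((pvLineB i a).length : Int)) (acc ++ [pvLineB i a])]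
      cases hf : pvFindCut max_chars (pvAllLines rest (i + 1)) (cc + ((pvLineB i a).length : Int)) with
      | none => simp
      | some c =>
        have harg : n - i - ((c : Nat) + 1 : Int) + 1 = n - (i + 1) - (c : Int) + 1 := by ring
        simp [harg]

theorem format_articles_for_prompt_py_spec : Claim_equal_format_articles_for_prompt_py := by
  intro articles max_chars _
  unfold Spec_format_articles_for_prompt_py format_articles_for_prompt_py format_articles_for_prompt_py_alt
  rw [pvLoopA_eq_scan]
  simp only [List.nil_append]
  cases hf : pvFindCut max_chars (pvAllLines articles 1) 0 with
  | none => rfl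
  | some c =>
    have harg : (articles.length : Int) - 1 - (c : Int) + 1 = (articles.length : Int) - (c : Int) := by ring
    simp [harg]
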